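-- pv_equiv track=rewrite | github.com/ValenUC3M/Assignment_Problem | Fase2/ASTARStowage.py | modify_map
-- ===== SOURCE A (Python) =====
-- def modify_map(map_list):
--     # this function is a bit more complex, it will adjust the map matrix to assure no flying X's create problems
--     # also it will calc and return the lists with the id of the N+E type slots and E type slots
--     # the for loop will read backwards the matrix, going from the bottom right to the top left,
--     # being the objective to find any flying X's and set to X everything that is located upwards in the same column
--     aux_col = len(map_list[0])
--     # arrays created for later use in set variable / constraints protocols
--     for i in range(aux_col):
--         # for the algorithm to work we need to set to false both control vars
--         container_found = False
--         flying_x_found = False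
--         aux_col -= 1
--         aux_row = len(map_list)
--         # read from every column, each row
--         for j in range(aux_row):
--             aux_row -= 1
--             if flying_x_found:
--                 map_list[aux_row][aux_col] = "X"
--             else:
--                 if container_found:
--                     if map_list[aux_row][aux_col] == "X":
--                         flying_x_found = True
--                 else:
--                     if map_list[aux_row][aux_col] != "X":
--                         container_found = True
--     return map_list
-- ===== SOURCE B (Python) =====
-- def modify_map(map_list):
--     # Two phases per column: locate the flying-X boundary, then fill down to it.
--     height = len(map_list)
--     for c in range(len(map_list[0])):
--         col = [row[c] for row in map_list]
--         # k: rows k..height-1 are the solid bottom stack of X's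
--         k = height
--         while k > 0 and col[k - 1] == "X":
--             k -= 1
--         # r: last X strictly above the bottom container (row k-1), -1 if none
--         r = -1
--         for idx in range(k - 1):
--             if col[idx] == "X":
--                 r = idx
--         # fill rows 0..r of this column with X's
--         for idx in range(r + 1):
--             map_list[idx][c] = "X"
--     return map_list
-- ===== Notes on version B (the rewrite author's own statement) =====
-- stated objective: alternative
-- what changed: Replaced A's interleaved bottom-up two-flag state machine per column by two separate phases (locate the flying-X boundary row, then fill the column from the top down to it) and iterates columns left-to-right instead of right-to-left.
import Mathlib
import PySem

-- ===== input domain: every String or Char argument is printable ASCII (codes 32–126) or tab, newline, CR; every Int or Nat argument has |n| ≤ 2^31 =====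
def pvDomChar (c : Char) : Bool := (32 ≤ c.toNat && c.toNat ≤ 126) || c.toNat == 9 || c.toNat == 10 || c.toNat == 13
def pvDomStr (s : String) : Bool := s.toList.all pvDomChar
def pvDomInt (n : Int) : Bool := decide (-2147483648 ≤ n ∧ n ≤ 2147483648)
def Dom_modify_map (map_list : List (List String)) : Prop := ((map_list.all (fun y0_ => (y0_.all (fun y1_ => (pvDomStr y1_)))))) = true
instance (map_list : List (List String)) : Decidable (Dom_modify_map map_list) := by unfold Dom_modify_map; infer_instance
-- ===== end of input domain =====

-- B replaces A's interleaved per-column state machine by boundary detection followed by a fill phase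
-- (alternative decomposition, same cost); both mutate map_list in place in Python and return it,
-- the equivalence proved here is about the returned value.

-- shared cell primitives (Python's m[r][c] read with "" default, and m[r][c] = "X")
def getCell (m : List (List String)) (r c : Nat) : String := (((m[r]?).getD [])[c]?).getD ""
def setCell (m : List (List String)) (r c : Nat) : List (List String) :=
  m.modify r (fun row => row.set c "X")

-- ===== PORT A =====
def modify_map (map_list : List (List String)) : List (List String) :=
  let w := ((map_list[0]?).getD []).length   -- len(map_list[0]); Pre_ excludes the empty-list IndexError
  ((List.range w).foldl
    (fun (st : Nat × List (List String)) _ =>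
      -- container_found := false, flying_x_found := false
      let aux_col := st.1 - 1
      let n := st.2.length                   -- aux_row = len(map_list)
      let fin := (List.range n).foldl
        (fun (s : Nat × List (List String) × Bool × Bool) _ =>
          let aux_row := s.1 - 1
          if s.2.2.2 then (aux_row, setCell s.2.1 aux_row aux_col, s.2.2.1, s.2.2.2)
          else if s.2.2.1 then
            if getCell s.2.1 aux_row aux_col = "X" then (aux_row, s.2.1, s.2.2.1, true)
            else (aux_row, s.2.1, s.2.2.1, s.2.2.2)
          else
            if getCell s.2.1 aux_row aux_col ≠ "X" then (aux_row, s.2.1, true, s.2.2.2)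
            else (aux_row, s.2.1, s.2.2.1, s.2.2.2))
        (n, st.2, false, false)
      (aux_col, fin.2.1))
    (w, map_list)).2

-- ===== PORT B =====
-- while k > 0 and col[k-1] == "X": k -= 1
def stripX (col : List String) : Nat → Nat
  | 0 => 0
  | k+1 => if (col[k]?).getD "" = "X" then stripX col k else k+1

def modify_map_alt (map_list : List (List String)) : List (List String) :=
  let height := map_list.length
  (List.range ((map_list[0]?).getD []).length).foldl
    (fun m c =>
      let col := m.map (fun row => (row[c]?).getD "")
      let k := stripX col height
      let r := (List.range (k - 1)).foldl
        (fun (r : Int) (idx : Nat) => if (col[idx]?).getD "" = "X" then (idx : Int) else r) (-1)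
      (List.range (r + 1).toNat).foldl (fun m2 idx => setCell m2 idx c) m)
    map_list

-- ===== PRECONDITION & SPEC =====
-- Pre_ excludes exactly the inputs where Python A raises IndexError: the empty list
-- (len(map_list[0])) and matrices with a row shorter than row 0 (map_list[r][c] lookup).
def Pre_modify_map (map_list : List (List String)) : Prop :=
  map_list ≠ [] ∧ ∀ row ∈ map_list, ((map_list[0]?).getD []).length ≤ row.length
instance (map_list : List (List String)) : Decidable (Pre_modify_map map_list) := by
  unfold Pre_modify_map; infer_instance
def pvWitness_modify_map : List (List String) := [["A", "X"], ["X", "X"]]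

def Spec_modify_map (map_list : List (List String)) (out : List (List String)) : Prop := out = modify_map_alt map_list
instance (map_list : List (List String)) (out : List (List String)) : Decidable (Spec_modify_map map_list out) := by unfold Spec_modify_map; infer_instance

-- ===== CLAIM (what is proved, stated in full; the proofs are below) =====
def Claim_equal_modify_map : Prop := ∀ (map_list : List (List String)), Dom_modify_map map_list → Pre_modify_map map_list → Spec_modify_map map_list (modify_map map_list)

-- ===== LEMMAS AND PROOFS =====

-- A's inner loop as an explicit counted recursion (the foldl ignores the range element)
def stepA (c : Nat) (s : Nat × List (List String) × Bool × Bool) :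
    Nat × List (List String) × Bool × Bool :=
  let aux_row := s.1 - 1
  if s.2.2.2 then (aux_row, setCell s.2.1 aux_row c, s.2.2.1, s.2.2.2)
  else if s.2.2.1 then
    if getCell s.2.1 aux_row c = "X" then (aux_row, s.2.1, s.2.2.1, true)
    else (aux_row, s.2.1, s.2.2.1, s.2.2.2)
  else
    if getCell s.2.1 aux_row c ≠ "X" then (aux_row, s.2.1, true, s.2.2.2)
    else (aux_row, s.2.1, s.2.2.1, s.2.2.2)

def loopA (c : Nat) : Nat → (Nat × List (List String) × Bool × Bool) →
    Nat × List (List String) × Bool × Bool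
  | 0, s => s
  | t+1, s => loopA c t (stepA c s)

-- canonical per-column artefacts
def fillTop (c : Nat) (m : List (List String)) : Nat → List (List String)
  | 0 => m
  | t+1 => setCell (fillTop c m t) t c

def stripXm (m : List (List String)) (c : Nat) : Nat → Nat
  | 0 => 0
  | t+1 => if getCell m t c = "X" then stripXm m c t else t+1

def lastXm (m : List (List String)) (c : Nat) : Nat → Option Nat
  | 0 => none
  | t+1 => if getCell m t c = "X" then some t else lastXm m c t

def sFun (m : List (List String)) (c : Nat) : Nat :=
  match lastXm m c (stripXm m c m.length - 1) with
  | none => 0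
  | some r => r + 1

def colOp (m : List (List String)) (c : Nat) : List (List String) :=
  fillTop c m (sFun m c)

theorem length_setCell (m : List (List String)) (r c : Nat) :
    (setCell m r c).length = m.length := by simp [setCell]

theorem length_fillTop (c : Nat) (m : List (List String)) (t : Nat) :
    (fillTop c m t).length = m.length := by
  induction t with
  | zero => rfl
  | succ t ih => simp [fillTop, length_setCell, ih]

theorem getCell_setCell_ne (m : List (List String)) (r c i c' : Nat)
    (h : c' ≠ c ∨ i ≠ r) : getCell (setCell m r c) i c' = getCell m i c' := by
  unfold getCell setCell
  rw [List.getElem?_modify]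
  cases hm : m[i]? with
  | none => simp
  | some row =>
    by_cases hri : r = i
    · subst hri
      rcases h with h | h
      · simp [Ne.symm h]
      · exact absurd rfl (Ne.symm h)
    · simp [hri]

theorem setCell_comm (m : List (List String)) (r c r' c' : Nat)
    (h : c ≠ c' ∨ r ≠ r') :
    setCell (setCell m r c) r' c' = setCell (setCell m r' c') r c := by
  apply List.ext_getElem?
  intro j
  simp only [setCell, List.getElem?_modify]
  cases hm : m[j]? with
  | none => simp
  | some row =>
    by_cases h1 : r = j <;> by_cases h2 : r' = j <;> simp [h1, h2]
    · subst h1; subst h2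
      rcases h with h | h
      · exact List.set_comm _ _ h
      · omega

-- setCell below the fill boundary commutes out of fillTop
theorem fillTop_setCell_ge (c : Nat) (m : List (List String)) (r : Nat) :
    ∀ t, t ≤ r → fillTop c (setCell m r c) t = setCell (fillTop c m t) r c := by
  intro t
  induction t with
  | zero => intro _; rfl
  | succ t ih =>
    intro h
    have ht : t ≤ r := Nat.le_of_succ_le h
    simp only [fillTop, ih ht]
    exact setCell_comm _ _ _ _ _ (Or.inr (by omega))

theorem setCell_fillTop_ne (c c' : Nat) (hc : c ≠ c') (m : List (List String)) (r : Nat) :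
    ∀ t, setCell (fillTop c' m t) r c = fillTop c' (setCell m r c) t := by
  intro t
  induction t with
  | zero => rfl
  | succ t ih =>
    simp only [fillTop, ← ih]
    exact setCell_comm _ _ _ _ _ (Or.inl (by omega))

theorem fillTop_fillTop (c c' : Nat) (hc : c ≠ c') (m : List (List String)) (t' : Nat) :
    ∀ t, fillTop c (fillTop c' m t') t = fillTop c' (fillTop c m t) t' := by
  intro t
  induction t with
  | zero => rfl
  | succ t ih =>
    simp only [fillTop, ih]
    exact setCell_fillTop_ne c c' hc _ t t'

theorem getCell_fillTop_ne_col (c c' : Nat) (hc : c' ≠ c) (m : List (List String)) (i : Nat) :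
    ∀ t, getCell (fillTop c' m t) i c = getCell m i c := by
  intro t
  induction t with
  | zero => rfl
  | succ t ih =>
    simp only [fillTop]
    rw [getCell_setCell_ne _ _ _ _ _ (Or.inl (Ne.symm hc)), ih]

theorem getCell_fillTop_ge (c c' : Nat) (m : List (List String)) (i : Nat) :
    ∀ t, t ≤ i → getCell (fillTop c' m t) i c = getCell m i c := by
  intro t
  induction t with
  | zero => intro _; rfl
  | succ t ih =>
    intro h
    simp only [fillTop]
    rw [getCell_setCell_ne _ _ _ _ _ (Or.inr (by omega)), ih (by omega)]

theorem lastXm_spec (m : List (List String)) (c : Nat) :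
    ∀ t r, lastXm m c t = some r → getCell m r c = "X" ∧ r < t := by
  intro t
  induction t with
  | zero => intro r h; simp [lastXm] at h
  | succ t ih =>
    intro r h
    by_cases hx : getCell m t c = "X"
    · simp [lastXm, hx] at h
      exact ⟨h ▸ hx, by omega⟩
    · simp [lastXm, hx] at h
      rcases ih r h with ⟨h1, h2⟩
      exact ⟨h1, by omega⟩

theorem set_id {α : Type} (l : List α) (i : Nat) (a : α) (h : l[i]? = some a) :
    l.set i a = l := by
  apply List.ext_getElem?
  intro j
  rw [List.getElem?_set]
  by_cases hij : i = j
  · subst hij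
    obtain ⟨h1, h2⟩ := List.getElem?_eq_some_iff.mp h
    simp [h1, h2]
  · simp [hij]

theorem setCell_id (m : List (List String)) (r c : Nat) (h : getCell m r c = "X") :
    setCell m r c = m := by
  unfold getCell at h
  cases hm : m[r]? with
  | none => simp [hm] at h
  | some row =>
    cases hc : row[c]? with
    | none => simp [hm, hc] at h
    | some v =>
      simp only [hm, hc, Option.getD_some] at h
      apply List.ext_getElem?
      intro j
      rw [setCell, List.getElem?_modify]
      by_cases hj : r = j
      · subst hj
        rw [hm]
        simp [set_id row c "X" (h ▸ hc)]
      · simp [hj]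

-- A's inner loop, phase by phase
theorem phaseA2 (c : Nat) : ∀ t m cf, loopA c t (t, m, cf, true) = (0, fillTop c m t, cf, true) := by
  intro t
  induction t with
  | zero => intro m cf; rfl
  | succ t ih =>
    intro m cf
    show loopA c t (stepA c (t+1, m, cf, true)) = _
    have hs : stepA c (t+1, m, cf, true) = (t, setCell m t c, cf, true) := by
      simp [stepA]
    rw [hs, ih]
    simp [fillTop, fillTop_setCell_ge c m t t le_rfl]

theorem phaseA1 (c : Nat) : ∀ t m, loopA c t (t, m, true, false) =
    (match lastXm m c t with
     | none => (0, m, true, false)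
     | some r => (0, fillTop c m r, true, true)) := by
  intro t
  induction t with
  | zero => intro m; rfl
  | succ t ih =>
    intro m
    show loopA c t (stepA c (t+1, m, true, false)) = _
    by_cases hx : getCell m t c = "X"
    · have hs : stepA c (t+1, m, true, false) = (t, m, true, true) := by simp [stepA, hx]
      rw [hs, phaseA2]
      simp [lastXm, hx]
    · have hs : stepA c (t+1, m, true, false) = (t, m, true, false) := by simp [stepA, hx]
      rw [hs, ih]
      simp [lastXm, hx]

theorem phaseA0 (c : Nat) : ∀ t m, (loopA c t (t, m, false, false)).2.1 =
    (match lastXm m c (stripXm m c t - 1) with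
     | none => m
     | some r => fillTop c m r) := by
  intro t
  induction t with
  | zero => intro m; rfl
  | succ t ih =>
    intro m
    show (loopA c t (stepA c (t+1, m, false, false))).2.1 = _
    by_cases hx : getCell m t c = "X"
    · have hs : stepA c (t+1, m, false, false) = (t, m, false, false) := by simp [stepA, hx]
      rw [hs, ih]
      simp [stripXm, hx]
    · have hs : stepA c (t+1, m, false, false) = (t, m, true, false) := by simp [stepA, hx]
      rw [hs, phaseA1]
      simp only [stripXm, if_neg hx, Nat.add_sub_cancel]
      cases lastXm m c t <;> simp

-- A's column result is colOp
theorem colA_eq (m : List (List String)) (c : Nat) :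
    (loopA c m.length (m.length, m, false, false)).2.1 = colOp m c := by
  rw [phaseA0]
  unfold colOp sFun
  cases h : lastXm m c (stripXm m c m.length - 1) with
  | none => rfl
  | some r =>
    have hx : getCell m r c = "X" := (lastXm_spec m c _ r h).1
    have : getCell (fillTop c m r) r c = "X" := by
      rw [getCell_fillTop_ge c c m r r le_rfl]; exact hx
    simp [fillTop, setCell_id _ _ _ this]

-- the A port's inner foldl ignores the range element
theorem foldl_stepA (c : Nat) : ∀ (l : List Nat) s,
    l.foldl (fun s _ => stepA c s) s = loopA c l.length s := by
  intro l
  induction l with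
  | nil => intro s; rfl
  | cons a l ih => intro s; simp only [List.foldl_cons, ih, List.length_cons]; rfl

-- stability of the column analysers under fills in other columns
theorem stripXm_fillTop (c c' : Nat) (hc : c' ≠ c) (m : List (List String)) (t' : Nat) :
    ∀ t, stripXm (fillTop c' m t') c t = stripXm m c t := by
  intro t
  induction t with
  | zero => rfl
  | succ t ih => simp only [stripXm, getCell_fillTop_ne_col c c' hc, ih]

theorem lastXm_fillTop (c c' : Nat) (hc : c' ≠ c) (m : List (List String)) (t' : Nat) :
    ∀ t, lastXm (fillTop c' m t') c t = lastXm m c t := by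
  intro t
  induction t with
  | zero => rfl
  | succ t ih => simp only [lastXm, getCell_fillTop_ne_col c c' hc, ih]

theorem sFun_fillTop (c c' : Nat) (hc : c' ≠ c) (m : List (List String)) (t' : Nat) :
    sFun (fillTop c' m t') c = sFun m c := by
  unfold sFun
  rw [length_fillTop, stripXm_fillTop c c' hc, lastXm_fillTop c c' hc]

theorem colOp_comm (m : List (List String)) (a b : Nat) :
    colOp (colOp m a) b = colOp (colOp m b) a := by
  by_cases hab : a = b
  · subst hab; rfl
  · unfold colOp
    rw [sFun_fillTop b a hab, sFun_fillTop a b (Ne.symm hab),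
        fillTop_fillTop b a (Ne.symm hab)]

theorem length_colOp (m : List (List String)) (c : Nat) :
    (colOp m c).length = m.length := length_fillTop _ _ _

-- bridge from B's mapped column to getCell
theorem colget (m : List (List String)) (c k : Nat) :
    (((m.map (fun row => (row[c]?).getD ""))[k]?).getD "") = getCell m k c := by
  rw [List.getElem?_map]
  cases h : m[k]? <;> simp [getCell, h]

theorem stripX_eq (m : List (List String)) (c : Nat) :
    ∀ t, stripX (m.map (fun row => (row[c]?).getD "")) t = stripXm m c t := by
  intro t
  induction t with
  | zero => rfl
  | succ t ih => simp only [stripX, stripXm, colget, ih]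

theorem rfold_eq (m : List (List String)) (c : Nat) :
    ∀ t, (List.range t).foldl
      (fun (r : Int) (idx : Nat) =>
        if ((m.map (fun row => (row[c]?).getD ""))[idx]?).getD "" = "X" then (idx : Int) else r) (-1)
      = (match lastXm m c t with | none => (-1 : Int) | some r => (r : Int)) := by
  intro t
  induction t with
  | zero => rfl
  | succ t ih =>
    rw [List.range_succ, List.foldl_append, ih, List.foldl_cons, List.foldl_nil, colget]
    by_cases hx : getCell m t c = "X"
    · simp [hx, lastXm]
    · simp [hx, lastXm]

theorem fillfold_eq (c : Nat) (m : List (List String)) :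
    ∀ s, (List.range s).foldl (fun m2 idx => setCell m2 idx c) m = fillTop c m s := by
  intro s
  induction s with
  | zero => rfl
  | succ s ih => rw [List.range_succ, List.foldl_append, ih]; rfl

-- B's per-column body is colOp (when the precomputed height is the current length)
theorem bodyB_eq (m : List (List String)) (c : Nat) (h : Nat) (hh : h = m.length) :
    ((List.range
        (((List.range ((stripX (m.map (fun row => (row[c]?).getD "")) h) - 1)).foldl
          (fun (r : Int) (idx : Nat) =>
            if ((m.map (fun row => (row[c]?).getD ""))[idx]?).getD "" = "X" then (idx : Int) else r)
          (-1) + 1).toNat)).foldl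
      (fun m2 idx => setCell m2 idx c) m) = colOp m c := by
  subst hh
  rw [stripX_eq, rfold_eq, fillfold_eq]
  unfold colOp sFun
  cases lastXm m c (stripXm m c m.length - 1) with
  | none => rfl
  | some r => simp

-- B's outer fold, with the height invariant, is the ascending colOp fold
theorem foldB_eq (height : Nat) : ∀ (l : List Nat) (m : List (List String)), height = m.length →
    l.foldl
      (fun mm c =>
        let col := mm.map (fun row => (row[c]?).getD "")
        let k := stripX col height
        let r := (List.range (k - 1)).foldl
          (fun (r : Int) (idx : Nat) => if (col[idx]?).getD "" = "X" then (idx : Int) else r) (-1)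
        (List.range (r + 1).toNat).foldl (fun m2 idx => setCell m2 idx c) mm) m
    = l.foldl colOp m := by
  intro l
  induction l with
  | nil => intro m _; rfl
  | cons a l ih =>
    intro m hm
    simp only [List.foldl_cons]
    rw [bodyB_eq m a height hm, ih _ (by rw [hm, length_colOp])]

-- A's outer loop as a counted recursion over descending columns
def outStep (st : Nat × List (List String)) : Nat × List (List String) :=
  let aux_col := st.1 - 1
  let n := st.2.length
  (aux_col, ((List.range n).foldl (fun s _ => stepA aux_col s) (n, st.2, false, false)).2.1)

def loopOut : Nat → (Nat × List (List String)) → Nat × List (List String)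
  | 0, s => s
  | t+1, s => loopOut t (outStep s)

theorem foldl_outStep : ∀ (l : List Nat) s,
    l.foldl (fun s _ => outStep s) s = loopOut l.length s := by
  intro l
  induction l with
  | nil => intro s; rfl
  | cons a l ih => intro s; simp only [List.foldl_cons, ih, List.length_cons]; rfl

theorem loopOut_eq : ∀ t m, (loopOut t (t, m)).2 = ((List.range t).reverse).foldl colOp m := by
  intro t
  induction t with
  | zero => intro m; rfl
  | succ t ih =>
    intro m
    have ho : outStep (t+1, m) = (t, colOp m t) := by
      unfold outStep
      simp only [Nat.add_sub_cancel]
      rw [foldl_stepA, List.length_range, colA_eq]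
    show (loopOut t (outStep (t+1, m))).2 = _
    rw [ho, ih]
    rw [List.range_succ, List.reverse_append]
    rfl

theorem modify_map_eq (m : List (List String)) :
    modify_map m = ((List.range (((m[0]?).getD []).length)).reverse).foldl colOp m := by
  have h1 : modify_map m =
      ((List.range (((m[0]?).getD []).length)).foldl (fun st _ => outStep st)
        ((((m[0]?).getD []).length), m)).2 := rfl
  rw [h1, foldl_outStep, List.length_range, loopOut_eq]

theorem modify_map_alt_eq (m : List (List String)) :
    modify_map_alt m = (List.range (((m[0]?).getD []).length)).foldl colOp m := by
  have h1 : modify_map_alt m =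
      (List.range (((m[0]?).getD []).length)).foldl
        (fun mm c =>
          let col := mm.map (fun row => (row[c]?).getD "")
          let k := stripX col m.length
          let r := (List.range (k - 1)).foldl
            (fun (r : Int) (idx : Nat) => if (col[idx]?).getD "" = "X" then (idx : Int) else r) (-1)
          (List.range (r + 1).toNat).foldl (fun m2 idx => setCell m2 idx c) mm) m := rfl
  rw [h1, foldB_eq m.length _ m rfl]

-- ===== VERDICT (by name: the statement is the Claim_ definition above) =====
theorem modify_map_spec : Claim_equal_modify_map := by
  intro map_list _ _
  unfold Spec_modify_map
  rw [modify_map_eq, modify_map_alt_eq]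
  letI : RightCommutative colOp := ⟨fun m a b => colOp_comm m a b⟩
  exact (List.reverse_perm _).foldl_eq map_list
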